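-- pv_equiv track=rewrite | github.com/tcbegley/advent-of-code | 2023/day18.py | collect_vertices
-- ===== SOURCE A (Python) =====
-- def tunnel(data):
--     vertices = []
--     loc = (0, 0)
--     for direction, steps in data:
--         loc = (loc[0] + steps * direction[0], loc[1] + steps * direction[1])
--         vertices.append(loc)
--
--     return vertices
--
-- def collect_vertices(data):
--     vertices = sorted(tunnel(data))
--     out = []
--     current_x = None
--     for vertex in vertices:
--         if vertex[0] != current_x:
--             out.append([])
--             current_x = vertex[0]
--         out[-1].append(vertex)
--     return out
-- ===== SOURCE B (Python) =====
-- def tunnel(data):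
--     vertices = []
--     loc = (0, 0)
--     for direction, steps in data:
--         loc = (loc[0] + steps * direction[0], loc[1] + steps * direction[1])
--         vertices.append(loc)
--
--     return vertices
--
-- def collect_vertices(data):
--     buckets = {}
--     for v in tunnel(data):
--         buckets.setdefault(v[0], []).append(v)
--     return [sorted(buckets[x]) for x in sorted(buckets)]
-- ===== Notes on version B (the rewrite author's own statement) =====
-- stated objective: alternative
-- what changed: Replaces A's global sort followed by a linear boundary-detecting scan with a one-pass dict bucketing by x, then sorting the distinct keys and each bucket independently.
import Mathlib
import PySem

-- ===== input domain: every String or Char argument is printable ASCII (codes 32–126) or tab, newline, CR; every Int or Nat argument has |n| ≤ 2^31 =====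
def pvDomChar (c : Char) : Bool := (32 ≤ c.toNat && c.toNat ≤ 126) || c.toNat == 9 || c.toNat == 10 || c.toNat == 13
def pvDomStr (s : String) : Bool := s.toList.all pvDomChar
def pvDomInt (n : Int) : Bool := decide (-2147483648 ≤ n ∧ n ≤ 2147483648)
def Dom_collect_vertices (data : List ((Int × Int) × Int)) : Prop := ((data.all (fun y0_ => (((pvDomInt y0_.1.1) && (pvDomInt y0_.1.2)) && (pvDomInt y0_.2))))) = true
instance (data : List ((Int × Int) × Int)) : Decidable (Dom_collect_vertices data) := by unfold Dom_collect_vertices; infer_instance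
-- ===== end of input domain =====

-- B buckets vertices by x in one dict pass, then sorts the distinct keys and each bucket,
-- instead of A's global sort followed by a boundary-detecting scan (alternative decomposition, same cost).


-- ===== PORT A =====
-- shared helper: both Python files contain the identical 'tunnel'
def tunnel (data : List ((Int × Int) × Int)) : List (Int × Int) :=
  (data.foldl (fun (st : List (Int × Int) × (Int × Int)) db =>
      let loc := (st.2.1 + db.2 * db.1.1, st.2.2 + db.2 * db.1.2)
      (st.1 ++ [loc], loc)) ([], (0, 0))).1

-- one iteration of A's 'for vertex in vertices' loop; state = (out, current_x).
-- 'out[-1].append(vertex)' is 'dropLast ++ [last ++ [v]]'; the '.getD []' default is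
-- unreachable (out is never empty when it is read) and only makes the step total.
def Astep (st : List (List (Int × Int)) × Option Int) (v : Int × Int) :
    List (List (Int × Int)) × Option Int :=
  let st' := if st.2 ≠ some v.1 then (st.1 ++ [([] : List (Int × Int))], some v.1) else st
  (st'.1.dropLast ++ [(st'.1.getLast?.getD []) ++ [v]], st'.2)

def collect_vertices (data : List ((Int × Int) × Int)) : List (List (Int × Int)) :=
  let vertices := PySem.List.sorted2 (tunnel data) (fun v => v.1) (fun v => v.2) false
  (vertices.foldl Astep ([], none)).1

-- ===== PORT B =====
def collect_vertices_alt (data : List ((Int × Int) × Int)) : List (List (Int × Int)) :=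
  let buckets := (tunnel data).foldl
    (fun (d : PySem.Dict Int (List (Int × Int))) v => d.modify v.1 [] (fun b => b ++ [v]))
    PySem.Dict.empty
  (PySem.List.sorted buckets.keys (fun x => x) false).map
    (fun x => PySem.List.sorted2 (buckets.getD x []) (fun v => v.1) (fun v => v.2) false)

-- ===== PRECONDITION & SPEC =====
def Spec_collect_vertices (data : List ((Int × Int) × Int)) (out : List (List (Int × Int))) : Prop := out = collect_vertices_alt data
instance (data : List ((Int × Int) × Int)) (out : List (List (Int × Int))) : Decidable (Spec_collect_vertices data out) := by unfold Spec_collect_vertices; infer_instance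

-- ===== CLAIM (what is proved, stated in full; the proofs are below) =====
def Claim_equal_collect_vertices : Prop := ∀ (data : List ((Int × Int) × Int)), Dom_collect_vertices data → Spec_collect_vertices data (collect_vertices data)

-- ===== LEMMAS AND PROOFS =====

-- the order sorted2 sorts by: Python's tuple comparison = the lexicographic order on Int × Int
def lexLe (a b : Int × Int) : Prop := toLex a ≤ toLex b

lemma lexLe_trans : Transitive lexLe := fun _ _ _ h1 h2 => le_trans h1 h2

lemma lexLe_iff (a b : Int × Int) : lexLe a b ↔ a.1 < b.1 ∨ (a.1 = b.1 ∧ a.2 ≤ b.2) := by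
  unfold lexLe
  exact Prod.Lex.toLex_le_toLex

lemma insertBy_pairwise {α : Type} (R : α → α → Prop) (before : α → α → Bool)
    (htrans : Transitive R)
    (ht : ∀ a b, before a b = true → R a b) (hf : ∀ a b, before a b = false → R b a)
    (x : α) (ys : List α) (h : ys.Pairwise R) :
    (PySem.List.insertBy before x ys).Pairwise R := by
  induction h with
  | nil => simp [PySem.List.insertBy]
  | @cons y ys hy hys ih =>
    by_cases hb : before x y = true
    · rw [show PySem.List.insertBy before x (y :: ys) = x :: y :: ys by
        simp [PySem.List.insertBy, hb]]
      refine List.Pairwise.cons ?_ (List.Pairwise.cons hy hys)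
      intro z hz
      simp only [List.mem_cons] at hz
      rcases hz with rfl | hz
      · exact ht _ _ hb
      · exact htrans (ht _ _ hb) (hy z hz)
    · rw [show PySem.List.insertBy before x (y :: ys) = y :: PySem.List.insertBy before x ys by
        simp [PySem.List.insertBy, hb]]
      refine List.Pairwise.cons ?_ ih
      intro z hz
      rw [PySem.List.mem_insertBy] at hz
      rcases hz with rfl | hz
      · exact hf _ _ (by simpa using hb)
      · exact hy z hz

lemma foldl_insertBy_pairwise {α : Type} (R : α → α → Prop) (before : α → α → Bool)
    (htrans : Transitive R)
    (ht : ∀ a b, before a b = true → R a b) (hf : ∀ a b, before a b = false → R b a)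
    (l : List α) : ∀ (acc : List α), acc.Pairwise R →
    (l.foldl (fun acc x => PySem.List.insertBy before x acc) acc).Pairwise R := by
  induction l with
  | nil => intro acc h; simpa using h
  | cons x l ih =>
    intro acc h
    exact ih _ (insertBy_pairwise R before htrans ht hf x acc h)

lemma sorted2_pairwise_lex (xs : List (Int × Int)) :
    (PySem.List.sorted2 xs (fun v => v.1) (fun v => v.2) false).Pairwise lexLe := by
  unfold PySem.List.sorted2
  simp only [if_neg (by decide : ¬ (false = true))]
  apply foldl_insertBy_pairwise _ _ lexLe_trans
  · intro a b hb
    simp only [Bool.or_eq_true, Bool.and_eq_true, Bool.not_eq_true', decide_eq_true_eq,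
      decide_eq_false_iff_not] at hb
    rw [lexLe_iff]
    omega
  · intro a b hb
    simp only [Bool.or_eq_false_iff, Bool.and_eq_false_iff, Bool.not_eq_false',
      decide_eq_true_eq, decide_eq_false_iff_not] at hb
    rw [lexLe_iff]
    omega
  · exact List.Pairwise.nil

lemma mem_sorted2 (xs : List (Int × Int)) (v : Int × Int) :
    v ∈ PySem.List.sorted2 xs (fun v => v.1) (fun v => v.2) false ↔ v ∈ xs :=
  (PySem.List.sorted2_perm xs _ _ false).mem_iff

lemma filter_ne_sub (vs : List (Int × Int)) (x y : Int) (hxy : y ≠ x) :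
    vs.filter (fun v => v.1 == y) = (vs.filter (fun v => !(v.1 == x))).filter (fun v => v.1 == y) := by
  rw [List.filter_filter]
  apply List.filter_congr
  intro v _
  by_cases h : v.1 = y
  · simp [h, hxy]
  · simp [h]

lemma flatMap_buckets_perm :
    ∀ (ks : List Int) (vs : List (Int × Int)), ks.Nodup → (∀ v ∈ vs, v.1 ∈ ks) →
    (ks.flatMap (fun x => PySem.List.sorted2 (vs.filter (fun v => v.1 == x)) (fun v => v.1) (fun v => v.2) false)).Perm vs := by
  intro ks
  induction ks with
  | nil =>
    intro vs _ hmem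
    cases vs with
    | nil => simp
    | cons v vs => exact absurd (hmem v (by simp)) (by simp)
  | cons x ks ih =>
    intro vs hnd hmem
    rw [List.flatMap_cons]
    have hks : ∀ y ∈ ks, vs.filter (fun v => v.1 == y) = (vs.filter (fun v => !(v.1 == x))).filter (fun v => v.1 == y) := by
      intro y hy
      exact filter_ne_sub vs x y (fun h => (List.nodup_cons.mp hnd).1 (h ▸ hy))
    have hcongr : ks.flatMap (fun y => PySem.List.sorted2 (vs.filter (fun v => v.1 == y)) (fun v => v.1) (fun v => v.2) false)
        = ks.flatMap (fun y => PySem.List.sorted2 ((vs.filter (fun v => !(v.1 == x))).filter (fun v => v.1 == y)) (fun v => v.1) (fun v => v.2) false) := by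
      apply List.flatMap_congr
      intro y hy
      rw [hks y hy]
    rw [hcongr]
    have hmem' : ∀ v ∈ vs.filter (fun v => !(v.1 == x)), v.1 ∈ ks := by
      intro v hv
      have h1 := hmem v (List.mem_of_mem_filter hv)
      have hvx : ¬ ((v.1 == x) = true) := by
        have := List.of_mem_filter hv
        simpa using this
      simp only [List.mem_cons] at h1
      rcases h1 with h | h
      · exact absurd (by simpa using h) hvx
      · exact h
    have hperm2 := ih (vs.filter (fun v => !(v.1 == x))) (List.nodup_cons.mp hnd).2 hmem'
    exact List.Perm.trans
      (List.Perm.append (PySem.List.sorted2_perm _ _ _ _) hperm2)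
      (List.filter_append_perm (fun v => v.1 == x) vs)

lemma fst_of_mem_bucket (vs : List (Int × Int)) (x : Int) (v : Int × Int)
    (h : v ∈ PySem.List.sorted2 (vs.filter (fun v => v.1 == x)) (fun v => v.1) (fun v => v.2) false) :
    v.1 = x := by
  rw [mem_sorted2] at h
  have := List.of_mem_filter h
  simpa using this

lemma flatMap_buckets_pairwise (ks : List Int) (vs : List (Int × Int)) (h : ks.Pairwise (· < ·)) :
    (ks.flatMap (fun x => PySem.List.sorted2 (vs.filter (fun v => v.1 == x)) (fun v => v.1) (fun v => v.2) false)).Pairwise lexLe := by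
  induction h with
  | nil => simp
  | @cons x ks hx hks ih =>
    rw [List.flatMap_cons, List.pairwise_append]
    refine ⟨sorted2_pairwise_lex _, ih, ?_⟩
    intro a ha b hb
    have ha1 : a.1 = x := fst_of_mem_bucket vs x a ha
    rw [List.mem_flatMap] at hb
    obtain ⟨y, hy, hby⟩ := hb
    have hb1 : b.1 = y := fst_of_mem_bucket vs y b hby
    rw [lexLe_iff]
    left
    rw [ha1, hb1]
    exact hx y hy

-- A's sorted vertex list is the concatenation of the per-x buckets, in increasing x order
lemma sorted2_eq_flatMap (vs : List (Int × Int)) :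
    PySem.List.sorted2 vs (fun v => v.1) (fun v => v.2) false
    = (PySem.List.sorted (PySem.Set.ofList (vs.map (fun v => v.1))) (fun x => x) false).flatMap
        (fun x => PySem.List.sorted2 (vs.filter (fun v => v.1 == x)) (fun v => v.1) (fun v => v.2) false) := by
  set ks := PySem.List.sorted (PySem.Set.ofList (vs.map (fun v => v.1))) (fun x => x) false with hks
  have hpw : ks.Pairwise (· < ·) := PySem.List.sorted_ofList_pairwise_lt _
  have hnd : ks.Nodup := hpw.imp (fun h => ne_of_lt h)
  have hmem : ∀ v ∈ vs, v.1 ∈ ks := by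
    intro v hv
    rw [hks, PySem.List.mem_sorted, PySem.Set.mem_ofList]
    exact List.mem_map_of_mem hv
  apply PySem.List.eq_of_perm_of_pairwise_le_of_injective (fun p => toLex p)
  · exact (toLex (α := Int × Int)).injective
  · exact ((flatMap_buckets_perm ks vs hnd hmem).trans (PySem.List.sorted2_perm vs _ _ false).symm).symm
  · exact sorted2_pairwise_lex vs
  · exact flatMap_buckets_pairwise ks vs hpw

lemma Astep_same (out : List (List (Int × Int))) (cur : List (Int × Int)) (v : Int × Int) :
    Astep (out ++ [cur], some v.1) v = (out ++ [cur ++ [v]], some v.1) := by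
  simp [Astep]

lemma Astep_new (out : List (List (Int × Int))) (cx : Option Int) (v : Int × Int)
    (h : cx ≠ some v.1) :
    Astep (out, cx) v = (out ++ [[v]], some v.1) := by
  simp [Astep, h]

-- A's loop over one constant-x run only extends the last group
lemma scan_inner (x : Int) :
    ∀ (b : List (Int × Int)) (out : List (List (Int × Int))) (cur : List (Int × Int)),
    (∀ v ∈ b, v.1 = x) →
    b.foldl Astep (out ++ [cur], some x) = (out ++ [cur ++ b], some x) := by
  intro b
  induction b with
  | nil => intro out cur _; simp
  | cons v b ih =>
    intro out cur h
    have hv : v.1 = x := h v (by simp)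
    rw [List.foldl_cons, show Astep (out ++ [cur], some x) v = (out ++ [cur ++ [v]], some x) by
      rw [← hv]; exact Astep_same out cur v]
    rw [ih out (cur ++ [v]) (fun w hw => h w (by simp [hw]))]
    simp

-- A's loop over a concatenation of nonempty constant-x runs with pairwise-distinct x's
-- produces exactly the list of runs
lemma scan_outer (f : Int → List (Int × Int)) :
    ∀ (xs : List Int) (out : List (List (Int × Int))) (cx : Option Int),
    (∀ x ∈ xs, f x ≠ [] ∧ (∀ v ∈ f x, v.1 = x) ∧ cx ≠ some x) → xs.Pairwise (· ≠ ·) →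
    ((xs.flatMap f).foldl Astep (out, cx)).1 = out ++ xs.map f := by
  intro xs
  induction xs with
  | nil => intro out cx _ _; simp
  | cons x xs ih =>
    intro out cx h hpw
    obtain ⟨hne, hfst, hcx⟩ := h x (by simp)
    rw [List.flatMap_cons, List.foldl_append]
    obtain ⟨v, b, hfx⟩ := List.exists_cons_of_ne_nil hne
    have hstate : (f x).foldl Astep (out, cx) = (out ++ [f x], some x) := by
      rw [hfx, List.foldl_cons]
      have hv : v.1 = x := hfst v (by rw [hfx]; simp)
      rw [show Astep (out, cx) v = (out ++ [[v]], some v.1) from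
        Astep_new out cx v (by rw [hv]; exact hcx)]
      rw [hv]
      have := scan_inner x b out [v] (fun w hw => hfst w (by rw [hfx]; simp [hw]))
      rw [this]; simp
    rw [hstate]
    have hcond : ∀ y ∈ xs, f y ≠ [] ∧ (∀ v ∈ f y, v.1 = y) ∧ some x ≠ some y := by
      intro y hy
      obtain ⟨h1, h2, _⟩ := h y (by simp [hy])
      refine ⟨h1, h2, ?_⟩
      simp only [ne_eq, Option.some.injEq]
      exact (List.pairwise_cons.mp hpw).1 y hy
    rw [ih (out ++ [f x]) (some x) hcond (List.pairwise_cons.mp hpw).2]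
    simp

-- B's dict loop: each bucket collects, in order, the vertices with that x
lemma bucket_getD :
    ∀ (l : List (Int × Int)) (d : PySem.Dict Int (List (Int × Int))) (c : Int),
    (l.foldl (fun (d : PySem.Dict Int (List (Int × Int))) v => d.modify v.1 [] (fun b => b ++ [v])) d).getD c []
      = d.getD c [] ++ l.filter (fun v => v.1 == c) := by
  intro l
  induction l with
  | nil => intro d c; simp
  | cons v l ih =>
    intro d c
    rw [List.foldl_cons, ih, PySem.Dict.getD_modify]
    by_cases h : c = v.1
    · subst h
      simp
    · rw [if_neg h, List.filter_cons, if_neg (by simpa using fun hh => h hh.symm)]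

lemma bucket_keys (l : List (Int × Int)) :
    (l.foldl (fun (d : PySem.Dict Int (List (Int × Int))) v => d.modify v.1 [] (fun b => b ++ [v])) PySem.Dict.empty).keys
      = PySem.Set.ofList (l.map (fun v => v.1)) := by
  rw [PySem.Dict.keys_foldl_modify_key l (fun v => v.1) [] (fun _ v b => b ++ [v]) PySem.Dict.empty]
  simp [PySem.Set.update, PySem.Set.ofList_eq_foldl, PySem.Dict.keys_empty]

lemma collect_vertices_eq_alt (data : List ((Int × Int) × Int)) :
    collect_vertices data = collect_vertices_alt data := by
  unfold collect_vertices collect_vertices_alt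
  set vs := tunnel data with hvs
  set ks := PySem.List.sorted (PySem.Set.ofList (vs.map (fun v => v.1))) (fun x => x) false with hksdef
  have hpw : ks.Pairwise (· < ·) := PySem.List.sorted_ofList_pairwise_lt _
  have hA : (((PySem.List.sorted2 vs (fun v => v.1) (fun v => v.2) false).foldl Astep ([], none)).1 : List (List (Int × Int)))
      = ks.map (fun x => PySem.List.sorted2 (vs.filter (fun v => v.1 == x)) (fun v => v.1) (fun v => v.2) false) := by
    rw [sorted2_eq_flatMap vs]
    rw [scan_outer _ ks [] none ?_ (hpw.imp (fun h => ne_of_lt h))]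
    · simp
    · intro x hx
      refine ⟨?_, fun v hv => fst_of_mem_bucket vs x v hv, by simp⟩
      have hx' : x ∈ vs.map (fun v => v.1) := by
        rw [hksdef, PySem.List.mem_sorted, PySem.Set.mem_ofList] at hx
        exact hx
      obtain ⟨v, hv, hvx⟩ := List.mem_map.mp hx'
      have : v ∈ PySem.List.sorted2 (vs.filter (fun v => v.1 == x)) (fun v => v.1) (fun v => v.2) false := by
        rw [mem_sorted2, List.mem_filter]
        exact ⟨hv, by simpa using hvx⟩
      exact List.ne_nil_of_mem this
  have hkeys : (vs.foldl (fun (d : PySem.Dict Int (List (Int × Int))) v => d.modify v.1 [] (fun b => b ++ [v])) PySem.Dict.empty).keys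
      = PySem.Set.ofList (vs.map (fun v => v.1)) := bucket_keys vs
  have hgetD : ∀ x, (vs.foldl (fun (d : PySem.Dict Int (List (Int × Int))) v => d.modify v.1 [] (fun b => b ++ [v])) PySem.Dict.empty).getD x []
      = vs.filter (fun v => v.1 == x) := by
    intro x
    rw [bucket_getD vs PySem.Dict.empty x]
    simp [PySem.Dict.getD_empty]
  simp only [hA, hkeys, hgetD]
  rfl

-- ===== VERDICT (by name: the statement is the Claim_ definition above) =====
theorem collect_vertices_spec : Claim_equal_collect_vertices := by
  unfold Claim_equal_collect_vertices Spec_collect_vertices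
  intro data _
  exact collect_vertices_eq_alt data
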